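-- pv_equiv track=rewrite | github.com/AstroMusers/AI-Boosted-Coronagraphy | util/util_visualize.py | create_declination_labels
-- ===== SOURCE A (Python) =====
-- def create_declination_labels(labelish, fixed=1):
--
--     labels = []
--
--     for i in range(len(labelish)):
--
--         if i == fixed:
--
--             labels.append(labelish[i])
--         else:
--             labels.append(labelish[i][4:])
--
--
--     return labels
-- ===== SOURCE B (Python) =====
-- def create_declination_labels(labelish, fixed=1):
--     # Split around the fixed index: trim the prefix and suffix wholesale,
--     # keep the fixed element untouched between them; no per-element index test.
--     def trim(part):
--         return [s[4:] for s in part]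
--     if 0 <= fixed < len(labelish):
--         return trim(labelish[:fixed]) + [labelish[fixed]] + trim(labelish[fixed+1:])
--     return trim(labelish)
-- ===== Notes on version B (the rewrite author's own statement) =====
-- stated objective: alternative
-- what changed: Instead of one indexed loop testing i == fixed at every element, B splits the list into the slice before fixed, the fixed element, and the slice after, trims the two slices wholesale and concatenates the three parts (no index test anywhere).
import Mathlib
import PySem

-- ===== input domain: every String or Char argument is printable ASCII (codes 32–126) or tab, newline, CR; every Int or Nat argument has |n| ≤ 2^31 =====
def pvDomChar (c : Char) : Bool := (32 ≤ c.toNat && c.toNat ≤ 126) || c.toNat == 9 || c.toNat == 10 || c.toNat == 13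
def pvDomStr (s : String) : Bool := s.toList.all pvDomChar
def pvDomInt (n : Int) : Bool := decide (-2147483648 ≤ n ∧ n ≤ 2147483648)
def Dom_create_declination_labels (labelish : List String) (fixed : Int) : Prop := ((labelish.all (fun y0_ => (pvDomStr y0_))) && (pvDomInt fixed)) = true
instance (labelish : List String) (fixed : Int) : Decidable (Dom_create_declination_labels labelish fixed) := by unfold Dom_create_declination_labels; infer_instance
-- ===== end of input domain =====

-- B splits the list around the fixed index and trims the two outer slices wholesale; alternative decomposition, same values.
-- ===== PORT A =====
def create_declination_labels (labelish : List String) (fixed : Int) : List String :=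
  (PySem.List.pyRange 0 (labelish.length : Int) 1).foldl
    (fun labels i =>
      if i = fixed then
        labels ++ [PySem.List.pyGetD labelish i ""]
      else
        labels ++ [PySem.Str.slice (PySem.List.pyGetD labelish i "") (some 4) none]) []

-- ===== PORT B =====
def pvTrim (part : List String) : List String :=
  part.map (fun s => PySem.Str.slice s (some 4) none)

def create_declination_labels_alt (labelish : List String) (fixed : Int) : List String :=
  if 0 ≤ fixed ∧ fixed < (labelish.length : Int) then
    pvTrim (PySem.List.slice labelish none (some fixed)) ++
      [PySem.List.pyGetD labelish fixed ""] ++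
      pvTrim (PySem.List.slice labelish (some (fixed + 1)) none)
  else
    pvTrim labelish

-- ===== PRECONDITION & SPEC =====
def Spec_create_declination_labels (labelish : List String) (fixed : Int) (out : List String) : Prop := out = create_declination_labels_alt labelish fixed
instance (labelish : List String) (fixed : Int) (out : List String) : Decidable (Spec_create_declination_labels labelish fixed out) := by unfold Spec_create_declination_labels; infer_instance

-- ===== CLAIM (what is proved, stated in full; the proofs are below) =====
def Claim_equal_create_declination_labels : Prop := ∀ (labelish : List String) (fixed : Int), Dom_create_declination_labels labelish fixed → Spec_create_declination_labels labelish fixed (create_declination_labels labelish fixed)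

-- ===== LEMMAS AND PROOFS =====

-- ===== VERDICT (by name: the statement is the Claim_ definition above) =====
theorem main_eq (labelish : List String) (fixed : Int) :
    create_declination_labels labelish fixed = create_declination_labels_alt labelish fixed := by
  unfold create_declination_labels create_declination_labels_alt pvTrim
  rw [PySem.List.pyRange_zero_natCast]
  have hbody : (fun (labels : List String) (i : Int) =>
      if i = fixed then labels ++ [PySem.List.pyGetD labelish i ""]
      else labels ++ [PySem.Str.slice (PySem.List.pyGetD labelish i "") (some 4) none])
      = fun labels i => labels ++ [if i = fixed then PySem.List.pyGetD labelish i ""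
          else PySem.Str.slice (PySem.List.pyGetD labelish i "") (some 4) none] := by
    funext labels i; split <;> rfl
  rw [hbody, PySem.List.foldl_append_singleton_eq_map]
  simp only [List.nil_append, List.map_map]
  split
  case isTrue h =>
    obtain ⟨h0, hlt⟩ := h
    set f := fixed.toNat with hf
    have hfix : fixed = (f : Int) := by omega
    have hflen : f < labelish.length := by omega
    rw [hfix, PySem.List.slice_to_natCast,
      show ((f : Int) + 1) = ((f + 1 : Nat) : Int) by push_cast; ring,
      PySem.List.slice_from_natCast]
    apply List.ext_getElem
    · simp; omega
    · intro n h1 h2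
      have hn' : n < labelish.length := by simpa using h1
      have hX : (List.map (fun s => PySem.Str.slice s (some 4) none) (List.take f labelish)).length = f := by
        simp [List.length_take]; omega
      simp only [List.getElem_map, List.getElem_range, Function.comp_apply]
      rcases lt_trichotomy n f with hc | hc | hc
      · have hne : ((n : Nat) : Int) ≠ (f : Int) := by omega
        rw [if_neg hne, List.getElem_append_left (by simp only [List.length_map, List.length_take, List.length_append, List.length_cons, List.length_nil]; omega),
          List.getElem_append_left (by simp only [List.length_map, List.length_take, List.length_append, List.length_cons, List.length_nil]; omega)]
        simp [PySem.List.pyGetD_natCast, List.getD, List.getElem?_eq_getElem hn']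
      · subst hc
        rw [if_pos rfl, List.getElem_append_left (by simp only [List.length_map, List.length_take, List.length_append, List.length_cons, List.length_nil]; omega),
          List.getElem_append_right (by simp only [List.length_map, List.length_take, List.length_append, List.length_cons, List.length_nil]; omega)]
        simp [PySem.List.pyGetD_natCast, List.getD, List.getElem?_eq_getElem hn']
      · have hne : ((n : Nat) : Int) ≠ (f : Int) := by omega
        rw [if_neg hne, List.getElem_append_right (by simp only [List.length_map, List.length_take, List.length_append, List.length_cons, List.length_nil]; omega)]
        have hidx : f + 1 + (n - (List.map (fun s => PySem.Str.slice s (some 4) none) (List.take f labelish) ++ [PySem.List.pyGetD labelish (f : Int) ""]).length) = n := by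
          simp only [List.length_map, List.length_take, List.length_append, List.length_cons, List.length_nil]; omega
        simp only [List.getElem_map, List.getElem_drop, hidx]
        simp [PySem.List.pyGetD_natCast, List.getD, List.getElem?_eq_getElem hn']
  case isFalse h =>
    apply List.ext_getElem
    · simp
    · intro n h1 h2
      have hn' : n < labelish.length := by simpa using h1
      have he : ((n : Nat) : Int) ≠ fixed := by
        intro heq; exact h ⟨by omega, by omega⟩
      simp [he, List.getD, List.getElem?_eq_getElem hn']

-- ===== VERDICT (by name: the statement is the Claim_ definition above) =====
theorem create_declination_labels_spec : Claim_equal_create_declination_labels :=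
  fun labelish fixed _ => main_eq labelish fixed
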